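-- pv_equiv track=rewrite | github.com/Extended-Timeline/etbot | etbot4.py | clean_digits
-- ===== SOURCE A (Python) =====
-- def is_number(string):  # checks if str is digit
--     string = str(string)
--     for char in string:
--         if char not in '0123456789':
--             return False
--     return True
--
-- def clean_digits(nachricht):  # remove leading digits (all digits until no more
--     check = False
--     cleantext = ''
--     for char in nachricht:
--         if not is_number(char) or check is True:
--             if check:
--                 cleantext = cleantext + char
--             check = True
--     return cleantext
-- ===== SOURCE B (Python) =====
-- def clean_digits(nachricht):  # strip the leading digit run, then drop the one delimiter char
--     return nachricht.lstrip('0123456789')[1:]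
-- ===== Notes on version B (the rewrite author's own statement) =====
-- stated objective: simpler
-- what changed: Replaces the char-by-char accumulation with a boolean flag by stripping the leading digit run once and slicing off one more character.
import Mathlib
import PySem

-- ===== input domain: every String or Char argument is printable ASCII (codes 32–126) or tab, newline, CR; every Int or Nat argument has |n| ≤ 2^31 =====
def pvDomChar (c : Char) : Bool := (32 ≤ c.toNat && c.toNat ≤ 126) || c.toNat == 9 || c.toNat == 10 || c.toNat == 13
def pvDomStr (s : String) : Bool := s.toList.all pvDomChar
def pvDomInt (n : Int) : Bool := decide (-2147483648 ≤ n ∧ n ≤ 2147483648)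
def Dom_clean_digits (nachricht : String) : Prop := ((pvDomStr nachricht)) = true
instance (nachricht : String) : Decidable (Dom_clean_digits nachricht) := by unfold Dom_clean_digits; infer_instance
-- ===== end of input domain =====

-- B strips the leading digit run once and slices off one more character; objective: simpler.

-- ===== PORT A =====
def is_number (string : String) : Bool :=
  -- 'for char in string: if char not in "0123456789": return False; return True'
  string.toList.all (fun c => ("0123456789".toList).contains c)

def clean_digits (nachricht : String) : String :=
  -- flag loop: state = (check, cleantext)
  let r := nachricht.toList.foldl
    (fun (st : Bool × List Char) char =>
      if !(is_number (String.ofList [char])) || st.1 then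
        (true, if st.1 then st.2 ++ [char] else st.2)
      else st)
    (false, [])
  String.ofList r.2

-- ===== PORT B =====
def clean_digits_alt (nachricht : String) : String :=
  -- nachricht.lstrip('0123456789')[1:]
  String.ofList (((nachricht.toList.dropWhile (fun c => ("0123456789".toList).contains c)).drop 1))

-- ===== PRECONDITION & SPEC =====
def Spec_clean_digits (nachricht : String) (out : String) : Prop := out = clean_digits_alt nachricht
instance (nachricht : String) (out : String) : Decidable (Spec_clean_digits nachricht out) := by unfold Spec_clean_digits; infer_instance

-- ===== CLAIM (what is proved, stated in full; the proofs are below) =====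
def Claim_equal_clean_digits : Prop := ∀ (nachricht : String), Dom_clean_digits nachricht → Spec_clean_digits nachricht (clean_digits nachricht)

-- ===== LEMMAS AND PROOFS =====

-- abbreviation used only in the proofs
def cdStep : Bool × List Char → Char → Bool × List Char :=
  fun st char =>
    if !(is_number (String.ofList [char])) || st.1 then
      (true, if st.1 then st.2 ++ [char] else st.2)
    else st

theorem cdStep_true (acc : List Char) (l : List Char) :
    l.foldl cdStep (true, acc) = (true, acc ++ l) := by
  induction l generalizing acc with
  | nil => simp
  | cons c cs ih => simp [cdStep, ih]

theorem is_number_single (c : Char) :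
    is_number (String.ofList [c]) = ("0123456789".toList).contains c := by
  simp [is_number, String.toList_ofList]

theorem cdStep_false (l : List Char) :
    l.foldl cdStep (false, []) =
      (!(l.dropWhile (fun c => ("0123456789".toList).contains c)).isEmpty,
       (l.dropWhile (fun c => ("0123456789".toList).contains c)).drop 1) := by
  induction l with
  | nil => simp
  | cons c cs ih =>
    by_cases h : ("0123456789".toList).contains c = true
    · have hstep : cdStep (false, []) c = (false, []) := by
        unfold cdStep
        rw [is_number_single, h]
        simp
      rw [List.foldl_cons, hstep, ih, List.dropWhile_cons_of_pos h]
    · have hstep : cdStep (false, []) c = (true, []) := by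
        unfold cdStep
        rw [is_number_single, Bool.of_not_eq_true h]
        simp
      rw [List.foldl_cons, hstep, cdStep_true,
        List.dropWhile_cons_of_neg (by simpa using h)]
      simp

-- ===== VERDICT (by name: the statement is the Claim_ definition above) =====
theorem clean_digits_spec : Claim_equal_clean_digits := by
  intro nachricht _
  show clean_digits nachricht = clean_digits_alt nachricht
  unfold clean_digits clean_digits_alt
  have : (fun (st : Bool × List Char) char =>
      if !(is_number (String.ofList [char])) || st.1 then
        (true, if st.1 then st.2 ++ [char] else st.2)
      else st) = cdStep := rfl
  rw [this, cdStep_false]
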